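-- pv_equiv track=rewrite | github.com/digitalp/nova-v1 | avatar_backend/services/camera_discovery.py | _pick_best_camera
-- ===== SOURCE A (Python) =====
-- def _pick_best_camera(cameras: list[str]) -> str | None:
--     """Pick the best camera entity for clip capture and vision snapshots.
--
--     Preference order:
--     1. Mainstream stream — 25 fps MJPEG, best clip quality
--     2. Any other non-fluent camera
--     3. Fluent as last resort (2 fps — poor for motion clips)
--
--     Single-frame snapshots (Coral / Gemini) use /api/camera_proxy/ which
--     normalises any camera entity to a JPEG regardless of stream type, so
--     mainstream entities work fine there too.
--     """
--     mainstream = [c for c in cameras if "mainstream" in c or "profile000" in c]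
--     if mainstream:
--         return mainstream[0]
--     non_fluent = [c for c in cameras if "fluent" not in c]
--     if non_fluent:
--         return non_fluent[0]
--     return cameras[0] if cameras else None
-- ===== SOURCE B (Python) =====
-- def _pick_best_camera(cameras: list[str]) -> str | None:
--     """Rank-based selection: score every camera (0 = mainstream/profile000,
--     1 = other non-fluent, 2 = fluent) and return the first camera with the
--     minimal score (Python's min is stable, so ties keep the earliest)."""
--     def rank(c: str) -> int:
--         if "mainstream" in c or "profile000" in c:
--             return 0
--         return 2 if "fluent" in c else 1
--     return min(cameras, key=rank) if cameras else None
-- ===== Notes on version B (the rewrite author's own statement) =====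
-- stated objective: alternative
-- what changed: Replaced A's staged filter-comprehensions (mainstream list, then non-fluent list, then raw head) with a scoring function that ranks each camera 0/1/2 and a single stable min-by-key selection.
import Mathlib
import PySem

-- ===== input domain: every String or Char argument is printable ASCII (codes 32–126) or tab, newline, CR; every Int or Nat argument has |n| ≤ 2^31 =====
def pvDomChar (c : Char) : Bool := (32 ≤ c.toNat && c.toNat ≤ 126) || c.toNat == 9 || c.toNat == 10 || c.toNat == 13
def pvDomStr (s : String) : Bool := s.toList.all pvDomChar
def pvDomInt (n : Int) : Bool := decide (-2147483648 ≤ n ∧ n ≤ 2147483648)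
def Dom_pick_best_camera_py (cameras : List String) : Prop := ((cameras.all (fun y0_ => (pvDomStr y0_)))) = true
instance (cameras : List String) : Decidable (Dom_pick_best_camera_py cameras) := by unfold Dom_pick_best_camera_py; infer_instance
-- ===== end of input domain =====

-- B replaces A's staged filter-comprehensions by a 0/1/2 scoring function and a
-- single stable min-by-key selection (alternative decomposition, same cost).


-- ===== PORT A =====
def pick_best_camera_py (cameras : List String) : Option String :=
  let mainstream := cameras.filter (fun c => PySem.Str.isIn "mainstream" c || PySem.Str.isIn "profile000" c)
  if mainstream.isEmpty = false then mainstream.head?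
  else
    let non_fluent := cameras.filter (fun c => !(PySem.Str.isIn "fluent" c))
    if non_fluent.isEmpty = false then non_fluent.head?
    else if cameras.isEmpty = false then cameras.head? else none

-- ===== PORT B =====
-- Source B's local `rank`: 0 = mainstream/profile000, 1 = other non-fluent, 2 = fluent
def rankB (c : String) : Nat :=
  if PySem.Str.isIn "mainstream" c || PySem.Str.isIn "profile000" c then 0
  else if PySem.Str.isIn "fluent" c then 2 else 1

-- Source B: `min(cameras, key=rank) if cameras else None`; PySem.List.min? is
-- Python's stable min-by-key (first minimal element, none on the empty list)
def pick_best_camera_py_alt (cameras : List String) : Option String :=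
  if cameras.isEmpty = false then PySem.List.min? cameras rankB else none

-- ===== PRECONDITION & SPEC =====
def Spec_pick_best_camera_py (cameras : List String) (out : Option String) : Prop := out = pick_best_camera_py_alt cameras
instance (cameras : List String) (out : Option String) : Decidable (Spec_pick_best_camera_py cameras out) := by unfold Spec_pick_best_camera_py; infer_instance

-- ===== CLAIM (what is proved, stated in full; the proofs are below) =====
def Claim_equal_pick_best_camera_py : Prop := ∀ (cameras : List String), Dom_pick_best_camera_py cameras → Spec_pick_best_camera_py cameras (pick_best_camera_py cameras)

-- ===== LEMMAS AND PROOFS =====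

-- closed form of the min?-fold once the accumulator is `some m`:
-- first rank-0 camera, else m if rank ≤ 1, else first rank-≤1 camera, else m
def pvSel (m : String) (rest : List String) : String :=
  if rankB m = 0 then m
  else
    match (rest.filter (fun c => rankB c == 0)).head? with
    | some z => z
    | none =>
      if rankB m ≤ 1 then m
      else
        match (rest.filter (fun c => decide (rankB c ≤ 1))).head? with
        | some z => z
        | none => m

theorem rank_cases (x : String) : rankB x = 0 ∨ rankB x = 1 ∨ rankB x = 2 := by
  unfold rankB; split_ifs <;> simp

theorem pvSel_step (m c : String) (t : List String) :
    pvSel (if rankB c < rankB m then c else m) t = pvSel m (c :: t) := by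
  rcases rank_cases m with hm|hm|hm <;> rcases rank_cases c with hc|hc|hc <;>
    cases h0 : (t.filter (fun c => rankB c == 0)).head? <;>
    cases h1 : (t.filter (fun c => decide (rankB c ≤ 1))).head? <;>
      simp [pvSel, hm, hc, h0, h1]

theorem foldl_some (f : Option String → String → Option String)
    (hf : ∀ m x, f (some m) x = if rankB x < rankB m then some x else some m)
    (rest : List String) (m : String) :
    List.foldl f (some m) rest = some (pvSel m rest) := by
  induction rest generalizing m with
  | nil => rcases rank_cases m with h|h|h <;> simp [pvSel, h]
  | cons c t ih =>
    rw [List.foldl_cons, hf, ← apply_ite some, ih]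
    exact congrArg some (pvSel_step m c t)

theorem min?_char (c : String) (t : List String) :
    PySem.List.min? (c :: t) rankB = some (pvSel c t) := by
  simp only [PySem.List.min?, List.foldl_cons]
  exact foldl_some _ (fun m x => rfl) t c

theorem mainP_eq_rank0 (x : String) :
    (PySem.Str.isIn "mainstream" x || PySem.Str.isIn "profile000" x) = (rankB x == 0) := by
  unfold rankB; split_ifs with h h2 <;> simp_all

theorem pick_eq (cameras : List String) :
    pick_best_camera_py cameras = pick_best_camera_py_alt cameras := by
  cases cameras with
  | nil => rfl
  | cons c t =>
    have hR : pick_best_camera_py_alt (c :: t) = some (pvSel c t) := by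
      simp [pick_best_camera_py_alt, min?_char]
    rw [hR]
    unfold pick_best_camera_py
    simp only []
    have hfil : ∀ l : List String,
        l.filter (fun x => PySem.Str.isIn "mainstream" x || PySem.Str.isIn "profile000" x)
        = l.filter (fun x => rankB x == 0) := by
      intro l; exact List.filter_congr (fun x _ => mainP_eq_rank0 x)
    rw [hfil]
    by_cases hc : (rankB c == 0) = true
    · have hc0 : rankB c = 0 := by simpa using hc
      simp [List.filter_cons, pvSel, hc0]
    · have hcb : (rankB c == 0) = false := by simpa using hc
      have hcne : rankB c ≠ 0 := by simpa using hc
      have hmc : (PySem.Str.isIn "mainstream" c || PySem.Str.isIn "profile000" c) = false :=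
        (mainP_eq_rank0 c).trans hcb
      rw [List.filter_cons_of_neg (p := fun x => rankB x == 0) (l := t) hc]
      cases h0 : t.filter (fun x => rankB x == 0) with
      | cons z l =>
        simp [h0, pvSel, hcne]
      | nil =>
        have hmem : ∀ x ∈ t, (rankB x == 0) = false := by
          intro x hx
          have := List.filter_eq_nil_iff.mp h0 x hx
          simpa using this
        -- on elements that are not mainstream, non-fluent ↔ rank ≤ 1
        have hle : ∀ x ∈ t, (!(PySem.Str.isIn "fluent" x)) = decide (rankB x ≤ 1) := by
          intro x hx
          have hmx : (PySem.Str.isIn "mainstream" x || PySem.Str.isIn "profile000" x) = false :=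
            (mainP_eq_rank0 x).trans (hmem x hx)
          cases hq : PySem.Str.isIn "fluent" x with
          | false =>
            have h1 : rankB x = 1 := by unfold rankB; rw [hmx, hq]; rfl
            rw [h1]; rfl
          | true =>
            have h2 : rankB x = 2 := by unfold rankB; rw [hmx, hq]; rfl
            rw [h2]; rfl
        have hfl : t.filter (fun x => !(PySem.Str.isIn "fluent" x))
            = t.filter (fun x => decide (rankB x ≤ 1)) := List.filter_congr hle
        rw [List.filter_cons, hfl]
        cases hq : PySem.Str.isIn "fluent" c with
        | false =>
          have hc1 : rankB c = 1 := by unfold rankB; rw [hmc, hq]; rfl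
          have hsel : pvSel c t = c := by unfold pvSel; rw [hc1, h0]; rfl
          rw [hsel]
          simp
        | true =>
          have hc2 : rankB c = 2 := by unfold rankB; rw [hmc, hq]; rfl
          cases h1 : t.filter (fun x => decide (rankB x ≤ 1)) with
          | cons z l =>
            have hsel : pvSel c t = z := by unfold pvSel; rw [hc2, h0, h1]; rfl
            rw [hsel]; simp
          | nil =>
            have hsel : pvSel c t = c := by unfold pvSel; rw [hc2, h0, h1]; rfl
            rw [hsel]; simp

-- ===== VERDICT (by name: the statement is the Claim_ definition above) =====
theorem pick_best_camera_py_spec : Claim_equal_pick_best_camera_py := by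
  intro cameras _
  exact pick_eq cameras
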